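-- pv_equiv track=rewrite | github.com/robinthibaut/skbel | skbel/goggles/_visualization.py | _my_alphabet
-- ===== SOURCE A (Python) =====
-- import itertools
-- import string
--
-- def _my_alphabet(az: int):
--     """
--     Method used to make custom figure annotations.
--     :param az: Index
--     :return:
--     """
--     alphabet = string.ascii_uppercase
--     extended_alphabet = ["".join(i) for i in list(itertools.permutations(alphabet, 2))]
--
--     if az <= 25:
--         sub = alphabet[az]
--     else:
--         j = az - 26
--         sub = extended_alphabet[j]
--
--     return sub
-- ===== SOURCE B (Python) =====
-- import string
--
-- def _my_alphabet(az: int):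
--     """Arithmetic version: derive the permutation pair from az instead of building all 650 pairs."""
--     alphabet = string.ascii_uppercase
--     if az <= 25:
--         return alphabet[az]
--     first, r = divmod(az - 26, 25)
--     second = r if r < first else r + 1
--     return alphabet[first] + alphabet[second]
-- ===== Notes on version B (the rewrite author's own statement) =====
-- stated objective: simpler
-- what changed: For az > 25, B computes the permutation pair arithmetically with divmod(az-26, 25) and a diagonal-skip adjustment instead of materialising all 650 two-letter permutations and indexing the list.
-- outside the precondition, e.g. on _my_alphabet(700): A raises IndexError, B raises IndexError; on _my_alphabet(-30): A raises IndexError, B raises IndexError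
import Mathlib
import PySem

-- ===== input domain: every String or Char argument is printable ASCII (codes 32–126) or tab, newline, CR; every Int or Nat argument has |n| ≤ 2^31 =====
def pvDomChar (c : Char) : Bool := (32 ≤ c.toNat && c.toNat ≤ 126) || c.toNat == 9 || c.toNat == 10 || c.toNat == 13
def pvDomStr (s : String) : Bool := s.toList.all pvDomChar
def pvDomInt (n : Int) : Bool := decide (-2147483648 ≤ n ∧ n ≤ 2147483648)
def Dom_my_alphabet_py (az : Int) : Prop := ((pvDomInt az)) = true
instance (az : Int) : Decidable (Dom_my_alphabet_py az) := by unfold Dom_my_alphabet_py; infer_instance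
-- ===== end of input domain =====

-- B replaces the materialised 650-element permutation list with divmod arithmetic on the index (objective: simpler).

-- ===== PORT A =====
-- alphabet = string.ascii_uppercase; extended_alphabet = ["".join(i) for i in permutations(alphabet, 2)]
def my_alphabet_py (az : Int) : String :=
  let alphabet := "ABCDEFGHIJKLMNOPQRSTUVWXYZ"
  let extended_alphabet :=
    (PySem.List.permutations alphabet.toList 2).map (fun i => String.ofList i)
  if az ≤ 25 then
    match PySem.Str.pyGet? alphabet az with   -- none = IndexError, excluded by Pre_
    | some c => String.ofList [c]
    | none => ""
  else
    let j := az - 26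
    match PySem.List.pyGet? extended_alphabet j with   -- none = IndexError, excluded by Pre_
    | some s => s
    | none => ""

-- ===== PORT B =====
def my_alphabet_py_alt (az : Int) : String :=
  let alphabet := "ABCDEFGHIJKLMNOPQRSTUVWXYZ"
  if az ≤ 25 then
    match PySem.Str.pyGet? alphabet az with   -- none = IndexError, excluded by Pre_
    | some c => String.ofList [c]
    | none => ""
  else
    match PySem.Int.divmod? (az - 26) 25 with
    | none => ""   -- unreachable: 25 ≠ 0
    | some (first, r) =>
      let second := if r < first then r else r + 1
      match PySem.Str.pyGet? alphabet first, PySem.Str.pyGet? alphabet second with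
      | some c1, some c2 => String.ofList [c1, c2]   -- alphabet[first] + alphabet[second]
      | _, _ => ""   -- none = IndexError, excluded by Pre_

-- ===== PRECONDITION & SPEC =====
-- Pre_ excludes exactly the inputs where A raises IndexError: az < -26 (negative
-- single-letter index past the front) or az > 675 (past the 650-entry pair list).
def Pre_my_alphabet_py (az : Int) : Prop := -26 ≤ az ∧ az ≤ 675
instance (az : Int) : Decidable (Pre_my_alphabet_py az) := by unfold Pre_my_alphabet_py; infer_instance
def pvWitness_my_alphabet_py : Int := (30)
def Spec_my_alphabet_py (az : Int) (out : String) : Prop := out = my_alphabet_py_alt az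
instance (az : Int) (out : String) : Decidable (Spec_my_alphabet_py az out) := by unfold Spec_my_alphabet_py; infer_instance

-- ===== CLAIM (what is proved, stated in full; the proofs are below) =====
def Claim_equal_my_alphabet_py : Prop := ∀ (az : Int), Dom_my_alphabet_py az → Pre_my_alphabet_py az → Spec_my_alphabet_py az (my_alphabet_py az)

-- ===== LEMMAS AND PROOFS =====

set_option maxRecDepth 10000 in
theorem my_alphabet_eq_on_range :
    ∀ k ∈ List.range 702, my_alphabet_py ((k : Int) - 26) = my_alphabet_py_alt ((k : Int) - 26) := by
  decide

-- ===== VERDICT (by name: the statement is the Claim_ definition above) =====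
theorem my_alphabet_py_spec : Claim_equal_my_alphabet_py := by
  intro az _ hpre
  obtain ⟨h1, h2⟩ := hpre
  have hk : (az + 26).toNat ∈ List.range 702 := by
    simp only [List.mem_range]; omega
  have := my_alphabet_eq_on_range _ hk
  have haz : ((az + 26).toNat : Int) - 26 = az := by omega
  rw [haz] at this
  exact this
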